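-- pv_equiv track=rewrite | github.com/allenschmaltz/memory_matching | archive_research_code/data/symmetric_preprocessing/fever_symmetric_data_preprocess_original_format.py | get_titles_in_claim
-- ===== SOURCE A (Python) =====
-- def get_titles_in_claim(claim, titles_dict, original_titles_dict):
--     titles_in_claim = set()
--     claim_tokens = claim.split()
--
--     for i in range(len(claim_tokens)):
--         for j in range(len(claim_tokens), i, -1):
--             possible_title = " ".join(claim_tokens[i:j])
--             if possible_title in titles_dict:
--                 titles_in_claim.update(original_titles_dict[possible_title])  # multiple titles may correspond to this filtered title
--                 break  # greedily take longest for each starting token from the left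
--     return titles_in_claim
-- ===== SOURCE B (Python) =====
-- def get_titles_in_claim(claim, titles_dict, original_titles_dict):
--     tokens = claim.split()
--     found = set()
--     for i in range(len(tokens)):
--         cand = None
--         best = None
--         for tok in tokens[i:]:
--             cand = tok if cand is None else cand + " " + tok
--             if cand in titles_dict:
--                 best = cand
--         if best is not None:
--             found.update(original_titles_dict[best])
--     return found
-- ===== Notes on version B (the rewrite author's own statement) =====
-- stated objective: alternative
-- what changed: Instead of re-joining every slice tokens[i:j] from scratch for each j (descending, break on first hit), B extends one candidate string token by token per start index and keeps the last (longest) dictionary hit.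
import Mathlib
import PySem

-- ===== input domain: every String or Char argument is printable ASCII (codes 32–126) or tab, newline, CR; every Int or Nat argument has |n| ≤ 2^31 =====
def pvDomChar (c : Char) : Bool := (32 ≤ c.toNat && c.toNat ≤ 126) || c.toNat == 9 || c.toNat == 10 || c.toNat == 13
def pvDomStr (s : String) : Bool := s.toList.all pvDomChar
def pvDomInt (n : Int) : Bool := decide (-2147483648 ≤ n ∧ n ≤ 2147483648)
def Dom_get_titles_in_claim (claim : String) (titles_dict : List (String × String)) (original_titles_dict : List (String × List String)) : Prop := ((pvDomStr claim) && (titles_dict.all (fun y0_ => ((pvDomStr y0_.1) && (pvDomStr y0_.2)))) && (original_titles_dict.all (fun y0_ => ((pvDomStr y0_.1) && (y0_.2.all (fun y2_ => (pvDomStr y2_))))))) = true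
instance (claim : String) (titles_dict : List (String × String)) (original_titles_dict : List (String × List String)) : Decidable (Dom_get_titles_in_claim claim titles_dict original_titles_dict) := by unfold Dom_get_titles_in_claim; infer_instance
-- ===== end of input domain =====

-- B replaces A's per-(i,j) re-join of tokens[i:j] (descending j, break on first hit) by one
-- incremental candidate string per start index, keeping the last (longest) dictionary hit.

-- ===== PORT A =====
-- inner loop 'for j in range(len(claim_tokens), i, -1): … break' of A, as recursion over the j list
def pvAInner (toks : List String) (td : PySem.Dict String String)
    (od : PySem.Dict String (List String)) (i : Int) (s : PySem.Set String) :
    List Int → PySem.Set String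
  | [] => s
  | j :: rest =>
    let possible_title := PySem.Str.join " " (PySem.List.slice toks (some i) (some j))
    if td.contains possible_title then
      -- original_titles_dict[possible_title]: Python raises KeyError when absent; Pre_ excludes that
      PySem.Set.update s (od.getD possible_title [])
    else
      pvAInner toks td od i s rest

def get_titles_in_claim (claim : String) (titles_dict : List (String × String)) (original_titles_dict : List (String × List String)) : List String :=
  let claim_tokens := PySem.Str.split₀ claim
  let td := PySem.Dict.mk titles_dict
  let od := PySem.Dict.mk original_titles_dict
  (PySem.List.pyRange 0 (PySem.List.len claim_tokens) 1).foldl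
    (fun s i => pvAInner claim_tokens td od i s
      (PySem.List.pyRange (PySem.List.len claim_tokens) i (-1)))
    PySem.Set.empty

-- ===== PORT B =====
-- one step of B's inner loop: extend the running candidate by one token, remember the last hit
-- (PySem.Str.join " " [c, tok] is exact for Python's c + " " + tok)
def pvBStep (td : PySem.Dict String String) (st : Option String × Option String) (tok : String) :
    Option String × Option String :=
  let cand := match st.1 with
    | none => tok
    | some c => PySem.Str.join " " [c, tok]
  (some cand, if td.contains cand then some cand else st.2)

def get_titles_in_claim_alt (claim : String) (titles_dict : List (String × String)) (original_titles_dict : List (String × List String)) : List String :=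
  let tokens := PySem.Str.split₀ claim
  let td := PySem.Dict.mk titles_dict
  let od := PySem.Dict.mk original_titles_dict
  (PySem.List.pyRange 0 (PySem.List.len tokens) 1).foldl
    (fun found i =>
      match ((PySem.List.slice tokens (some i) none).foldl (pvBStep td) (none, none)).2 with
      | some best => PySem.Set.update found (od.getD best [])
      | none => found)
    PySem.Set.empty

-- ===== PRECONDITION & SPEC =====
def pvKey (toks : List String) (a b : Nat) : String :=
  PySem.Str.join " " ((toks.drop a).take (b - a))

-- Pre_ excludes exactly the inputs on which Python A raises KeyError: a greedy-longest
-- titles_dict match at some start token that is missing from original_titles_dict.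
def Pre_get_titles_in_claim (claim : String) (titles_dict : List (String × String)) (original_titles_dict : List (String × List String)) : Prop :=
  ∀ b < (PySem.Str.split₀ claim).length + 1, ∀ a < b,
    (PySem.Dict.mk titles_dict).contains (pvKey (PySem.Str.split₀ claim) a b) = true →
    (∀ b' < (PySem.Str.split₀ claim).length + 1, b < b' →
      (PySem.Dict.mk titles_dict).contains (pvKey (PySem.Str.split₀ claim) a b') = false) →
    (PySem.Dict.mk original_titles_dict).contains (pvKey (PySem.Str.split₀ claim) a b) = true
instance (claim : String) (titles_dict : List (String × String)) (original_titles_dict : List (String × List String)) : Decidable (Pre_get_titles_in_claim claim titles_dict original_titles_dict) := by unfold Pre_get_titles_in_claim; infer_instance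

def pvWitness_get_titles_in_claim : String × (List (String × String)) × (List (String × List String)) :=
  ("a b", [("a b", "x")], [("a b", ["T1", "T2"])])

def Spec_get_titles_in_claim (claim : String) (titles_dict : List (String × String)) (original_titles_dict : List (String × List String)) (out : List String) : Prop := out = get_titles_in_claim_alt claim titles_dict original_titles_dict
instance (claim : String) (titles_dict : List (String × String)) (original_titles_dict : List (String × List String)) (out : List String) : Decidable (Spec_get_titles_in_claim claim titles_dict original_titles_dict out) := by unfold Spec_get_titles_in_claim; infer_instance

-- ===== CLAIM (what is proved, stated in full; the proofs are below) =====
def Claim_equal_get_titles_in_claim : Prop := ∀ (claim : String) (titles_dict : List (String × String)) (original_titles_dict : List (String × List String)), Dom_get_titles_in_claim claim titles_dict original_titles_dict → Pre_get_titles_in_claim claim titles_dict original_titles_dict → Spec_get_titles_in_claim claim titles_dict original_titles_dict (get_titles_in_claim claim titles_dict original_titles_dict)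

-- ===== LEMMAS AND PROOFS =====

-- the candidate strings B builds, start value c then extending token by token
def pvCat (c t : String) : String := PySem.Str.join " " [c, t]

def pvCandList (c : String) : List String → List String
  | [] => []
  | t :: ts => pvCat c t :: pvCandList (pvCat c t) ts

def pvCands : List String → List String
  | [] => []
  | t :: ts => t :: pvCandList t ts

theorem pvJoin_cat (c t : String) (l : List String) :
    PySem.Str.join " " (pvCat c t :: l) = PySem.Str.join " " (c :: t :: l) := by
  apply String.ext
  cases l with
  | nil =>
      simp [pvCat, PySem.Str.toList_join, PySem.Chars.join_singleton, PySem.Chars.join_cons_cons]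
  | cons x xs =>
      simp [pvCat, PySem.Str.toList_join, PySem.Chars.join_singleton, PySem.Chars.join_cons_cons,
        List.append_assoc]

theorem pvJoin_singleton (t : String) : PySem.Str.join " " [t] = t := by
  apply String.ext
  simp [PySem.Str.toList_join, PySem.Chars.join_singleton]

theorem pvCandList_eq (ts : List String) : ∀ c : String,
    pvCandList c ts
      = (List.range ts.length).map (fun k => PySem.Str.join " " (c :: ts.take (k + 1))) := by
  induction ts with
  | nil => intro c; rfl
  | cons t ts ih =>
      intro c
      show pvCat c t :: pvCandList (pvCat c t) ts = _
      rw [List.length_cons, List.range_succ_eq_map, List.map_cons, List.map_map]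
      refine congrArg₂ _ rfl ?_
      rw [ih (pvCat c t)]
      refine List.map_congr_left ?_
      intro k _
      show PySem.Str.join " " (pvCat c t :: ts.take (k + 1))
         = PySem.Str.join " " (c :: (t :: ts).take (k + 1 + 1))
      rw [List.take_succ_cons]
      exact pvJoin_cat c t (ts.take (k + 1))

theorem pvCands_eq (ts : List String) :
    pvCands ts = (List.range ts.length).map (fun k => PySem.Str.join " " (ts.take (k + 1))) := by
  cases ts with
  | nil => rfl
  | cons t ts =>
      show t :: pvCandList t ts = _
      rw [List.length_cons, List.range_succ_eq_map, List.map_cons, List.map_map]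
      refine congrArg₂ _ ?_ ?_
      · show t = PySem.Str.join " " [t]
        exact (pvJoin_singleton t).symm
      · rw [pvCandList_eq]
        refine List.map_congr_left ?_
        intro k _
        rfl

theorem pvFoldB (td : PySem.Dict String String) (ts : List String) : ∀ (c : String) (b : Option String),
    ts.foldl (pvBStep td) (some c, b)
      = (some (ts.foldl pvCat c),
         match (pvCandList c ts).reverse.find? (fun x => td.contains x) with
         | some y => some y
         | none => b) := by
  induction ts with
  | nil => intro c b; rfl
  | cons t ts ih =>
      intro c b
      show List.foldl (pvBStep td) (pvBStep td (some c, b) t) ts = _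
      have hstep : pvBStep td (some c, b) t
          = (some (pvCat c t), if td.contains (pvCat c t) then some (pvCat c t) else b) := rfl
      rw [hstep, ih]
      show (_, _) = (_, _)
      refine congrArg₂ _ rfl ?_
      show _ = (match (pvCat c t :: pvCandList (pvCat c t) ts).reverse.find? (fun x => td.contains x) with
                | some y => some y
                | none => b)
      rw [List.reverse_cons, List.find?_append]
      cases hf : (pvCandList (pvCat c t) ts).reverse.find? (fun x => td.contains x) with
      | some y => simp [Option.or]
      | none =>
          by_cases h : td.contains (pvCat c t) = true <;>
            simp [Option.or, List.find?, h]

theorem pvBestOf (td : PySem.Dict String String) (ts : List String) :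
    ((ts.foldl (pvBStep td) (none, none)).2 : Option String)
      = (pvCands ts).reverse.find? (fun x => td.contains x) := by
  cases ts with
  | nil => rfl
  | cons t ts =>
      show (List.foldl (pvBStep td) (pvBStep td (none, none) t) ts).2 = _
      have hstep : pvBStep td ((none : Option String), (none : Option String)) t
          = (some t, if td.contains t then some t else none) := rfl
      rw [hstep, pvFoldB]
      show (match (pvCandList t ts).reverse.find? (fun x => td.contains x) with
            | some y => some y
            | none => if td.contains t then some t else none) = _
      show _ = (t :: pvCandList t ts).reverse.find? (fun x => td.contains x)
      rw [List.reverse_cons, List.find?_append]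
      cases hf : (pvCandList t ts).reverse.find? (fun x => td.contains x) with
      | some y => simp [Option.or]
      | none =>
          by_cases h : td.contains t = true <;> simp [Option.or, List.find?, h]

theorem pvAInner_eq (toks : List String) (td : PySem.Dict String String)
    (od : PySem.Dict String (List String)) (i : Int) (s : PySem.Set String) (js : List Int) :
    pvAInner toks td od i s js
      = match js.find? (fun j => td.contains (PySem.Str.join " " (PySem.List.slice toks (some i) (some j)))) with
        | some j => PySem.Set.update s (od.getD (PySem.Str.join " " (PySem.List.slice toks (some i) (some j))) [])
        | none => s := by
  induction js with
  | nil => rfl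
  | cons j rest ih =>
      rw [List.find?_cons]
      by_cases h : td.contains (PySem.Str.join " " (PySem.List.slice toks (some i) (some j))) = true
      · simp only [pvAInner, h, if_true]
      · simp only [pvAInner, h, if_false, Bool.false_eq_true]
        rw [ih]

theorem pvPerStart (toks : List String) (td : PySem.Dict String String)
    (od : PySem.Dict String (List String)) (s : PySem.Set String) (i : Int) (hi : 0 ≤ i) :
    pvAInner toks td od i s (PySem.List.pyRange (PySem.List.len toks) i (-1))
      = match ((PySem.List.slice toks (some i) none).foldl (pvBStep td) (none, none)).2 with
        | some best => PySem.Set.update s (od.getD best [])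
        | none => s := by
  rw [pvAInner_eq, PySem.List.pyRange_neg_one_eq_reverse, pvBestOf,
    PySem.List.slice_from toks hi, pvCands_eq]
  have hii : i = (i.toNat : Int) := (Int.toNat_of_nonneg hi).symm
  have hmap : (PySem.List.pyRange (i + 1) (PySem.List.len toks + 1)).map
        (fun j => PySem.Str.join " " (PySem.List.slice toks (some i) (some j)))
      = (List.range (toks.drop i.toNat).length).map
        (fun k => PySem.Str.join " " ((toks.drop i.toNat).take (k + 1))) := by
    rw [PySem.List.pyRange_one, List.map_map]
    have hlen : PySem.List.len toks = (toks.length : Int) := by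
      simp [PySem.List.len]
    have hcount : (PySem.List.len toks + 1 - (i + 1)).toNat = (toks.drop i.toNat).length := by
      rw [hlen, List.length_drop]
      omega
    rw [hcount]
    refine List.map_congr_left ?_
    intro k hk
    show PySem.Str.join " " (PySem.List.slice toks (some i) (some (i + 1 + (k : Int)))) = _
    have hb : i + 1 + (k : Int) = ((i.toNat + (k + 1) : Nat) : Int) := by omega
    rw [hb, hii, PySem.List.slice_natCast]
    simp only [Int.toNat_natCast]
    have hsub : i.toNat + (k + 1) - i.toNat = k + 1 := by omega
    rw [hsub]
  rw [← hmap, ← List.map_reverse, List.find?_map]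
  cases hf : (PySem.List.pyRange (i + 1) (PySem.List.len toks + 1)).reverse.find?
      ((fun x => td.contains x) ∘ fun j => PySem.Str.join " " (PySem.List.slice toks (some i) (some j))) with
  | none =>
      simp only [Function.comp_def] at hf
      rw [hf]
      rfl
  | some j =>
      simp only [Function.comp_def] at hf
      rw [hf]
      rfl

-- ===== VERDICT (by name: the statement is the Claim_ definition above) =====
theorem get_titles_in_claim_spec : Claim_equal_get_titles_in_claim := by
  intro claim titles_dict original_titles_dict _hdom _hpre
  unfold Spec_get_titles_in_claim get_titles_in_claim get_titles_in_claim_alt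
  apply PySem.List.foldl_congr_mem
  intro acc i hmem
  have hi : 0 ≤ i := (PySem.List.mem_pyRange_one.mp hmem).1
  exact pvPerStart _ _ _ acc i hi
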